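-- pv_equiv track=rewrite | github.com/WisdomWolf/advent_of_code_2023 | day9/solution.py | calc_diff_list
-- ===== SOURCE A (Python) =====
-- def get_diffs(seq):
--     diffs = []
--     for i in range(len(seq) - 1):
--         diffs.append(seq[i + 1] - seq[i])
--     return diffs
--
-- def calc_diff_list(seq):
--     diff_list = [seq]
--     diffs = seq
--     while any(diffs):
--         diffs = get_diffs(diffs)
--         if any(diffs):
--             diff_list.append(diffs)
--     return diff_list
-- ===== SOURCE B (Python) =====
-- def calc_diff_list(seq):
--     diffs = [b - a for a, b in zip(seq, seq[1:])]
--     if not any(diffs):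
--         return [seq]
--     return [seq] + calc_diff_list(diffs)
-- ===== Notes on version B (the rewrite author's own statement) =====
-- stated objective: simpler
-- what changed: Replaces A's iterative accumulate-while-lookahead loop and index-based helper by a four-line recursion on the difference sequence: the list of levels is [seq] followed by the levels of the diffs, with a lookahead base case that drops the trailing all-zero level.
import Mathlib
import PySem

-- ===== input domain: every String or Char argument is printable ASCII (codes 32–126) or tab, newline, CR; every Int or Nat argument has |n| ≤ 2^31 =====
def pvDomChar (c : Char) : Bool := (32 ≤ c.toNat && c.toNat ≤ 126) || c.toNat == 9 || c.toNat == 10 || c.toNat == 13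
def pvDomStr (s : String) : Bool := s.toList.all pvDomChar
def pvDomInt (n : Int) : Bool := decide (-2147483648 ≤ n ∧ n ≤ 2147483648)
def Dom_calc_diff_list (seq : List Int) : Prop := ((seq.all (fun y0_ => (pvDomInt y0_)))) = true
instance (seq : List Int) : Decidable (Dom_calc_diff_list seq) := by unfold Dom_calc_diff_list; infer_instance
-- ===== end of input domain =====

-- B replaces A's iterative accumulate-with-lookahead loop and index helper by a short recursion on the diff sequence (simpler; same cost).

-- ===== PORT A =====
-- get_diffs: for i in range(len(seq)-1): diffs.append(seq[i+1]-seq[i]); indices always in range, so pyGetD 0 is exact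
def get_diffs (seq : List Int) : List Int :=
  (PySem.List.pyRange 0 ((seq.length : Int) - 1) 1).foldl
    (fun diffs i => diffs ++ [PySem.List.pyGetD seq (i + 1) 0 - PySem.List.pyGetD seq i 0]) []

theorem get_diffs_len (seq : List Int) : (get_diffs seq).length = seq.length - 1 := by
  rw [get_diffs, PySem.List.foldl_append_singleton_eq_map]
  simp [PySem.List.length_pyRange_one]

-- the while-loop of A, state = (diff_list, diffs)
def calc_diff_loop (diff_list : List (List Int)) (diffs : List Int) : List (List Int) :=
  if h : diffs.any (· != 0) then
    let d := get_diffs diffs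
    calc_diff_loop (if d.any (· != 0) then diff_list ++ [d] else diff_list) d
  else diff_list
termination_by diffs.length
decreasing_by
  have hne : diffs ≠ [] := by
    rcases List.any_eq_true.mp h with ⟨x, hx, _⟩
    exact List.ne_nil_of_mem hx
  have := get_diffs_len diffs
  have : diffs.length ≥ 1 := List.length_pos_iff.mpr hne
  simp [get_diffs_len]; omega

def calc_diff_list (seq : List Int) : List (List Int) :=
  calc_diff_loop [seq] seq

-- ===== PORT B =====
-- [b - a for a, b in zip(seq, seq[1:])]
def pairDiffs (xs : List Int) : List Int :=
  List.zipWith (fun a b => b - a) xs (PySem.List.slice xs (some 1) none)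

theorem pairDiffs_len (xs : List Int) : (pairDiffs xs).length = xs.length - 1 := by
  simp [pairDiffs, PySem.List.slice_from_one]

-- the recursion of B: if not any(diffs): return [seq]; return [seq] + calc_diff_list(diffs)
def calc_diff_list_alt (seq : List Int) : List (List Int) :=
  let diffs := pairDiffs seq
  if h : diffs.any (· != 0) then seq :: calc_diff_list_alt diffs
  else [seq]
termination_by seq.length
decreasing_by
  have hne : pairDiffs seq ≠ [] := by
    rcases List.any_eq_true.mp h with ⟨x, hx, _⟩
    exact List.ne_nil_of_mem hx
  have h1 : (pairDiffs seq).length ≥ 1 := List.length_pos_iff.mpr hne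
  have := pairDiffs_len seq
  omega

-- ===== PRECONDITION & SPEC =====
def Spec_calc_diff_list (seq : List Int) (out : List (List Int)) : Prop := out = calc_diff_list_alt seq
instance (seq : List Int) (out : List (List Int)) : Decidable (Spec_calc_diff_list seq out) := by unfold Spec_calc_diff_list; infer_instance

-- ===== CLAIM (what is proved, stated in full; the proofs are below) =====
def Claim_equal_calc_diff_list : Prop := ∀ (seq : List Int), Dom_calc_diff_list seq → Spec_calc_diff_list seq (calc_diff_list seq)

-- ===== LEMMAS AND PROOFS =====

-- the two diff helpers agree
theorem get_diffs_eq_pairDiffs (s : List Int) : get_diffs s = pairDiffs s := by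
  rw [get_diffs, PySem.List.foldl_append_singleton_eq_map, PySem.List.pyRange_one]
  apply List.ext_getElem
  · simp [pairDiffs, PySem.List.slice_from_one]
  · intro k h1 h2
    simp [pairDiffs, PySem.List.slice_from_one] at h2 ⊢
    have hk1 : k + 1 < s.length := by omega
    have hk : k < s.length := by omega
    have hc : ((k : Int) + 1) = ((k + 1 : Nat) : Int) := by push_cast; ring
    rw [hc, PySem.List.pyGetD_natCast]
    simp [hk, hk1]

-- all-zero input gives all-zero diffs
theorem pairDiffs_zero : ∀ (s : List Int), s.any (· != 0) = false →
    (pairDiffs s).any (· != 0) = false := by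
  intro s
  induction s with
  | nil => intro _; simp [pairDiffs]
  | cons a t ih =>
    intro hs
    cases t with
    | nil => simp [pairDiffs, PySem.List.slice_from_one]
    | cons b u =>
      have step : pairDiffs (a :: b :: u) = (b - a) :: pairDiffs (b :: u) := by
        simp [pairDiffs, PySem.List.slice_from_one]
      simp only [List.any_cons, Bool.or_eq_false_iff] at hs
      obtain ⟨ha, hb, hu⟩ := hs
      have hbu : (b :: u).any (· != 0) = false := by simp [List.any_cons, hb, hu]
      rw [step, List.any_cons, ih hbu]
      simp at ha hb ⊢
      omega

-- B's recursion always starts with its argument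
theorem alt_cons (s : List Int) :
    calc_diff_list_alt s = s :: (calc_diff_list_alt s).drop 1 := by
  rw [calc_diff_list_alt]
  by_cases h : (pairDiffs s).any (· != 0) <;> simp [h]

-- when the input is all zero, B returns just the input
theorem alt_zero (s : List Int) (h : s.any (· != 0) = false) :
    calc_diff_list_alt s = [s] := by
  rw [calc_diff_list_alt]
  simp [pairDiffs_zero s h]

-- A's loop appends exactly the levels after the head of B's recursion
theorem loop_eq_alt_drop (diffs : List Int) (acc : List (List Int)) :
    calc_diff_loop acc diffs = acc ++ (calc_diff_list_alt diffs).drop 1 := by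
  induction hn : diffs.length using Nat.strong_induction_on generalizing diffs acc with
  | _ n IH =>
  subst hn
  rw [calc_diff_loop]
  by_cases h : diffs.any (· != 0)
  · rw [dif_pos h]
    have hne : diffs ≠ [] := by
      rcases List.any_eq_true.mp h with ⟨x, hx, _⟩
      exact List.ne_nil_of_mem hx
    have hlen : diffs.length ≥ 1 := List.length_pos_iff.mpr hne
    have hlt : (pairDiffs diffs).length < diffs.length := by
      rw [pairDiffs_len]; omega
    have hgd : get_diffs diffs = pairDiffs diffs := get_diffs_eq_pairDiffs diffs
    by_cases hd : (pairDiffs diffs).any (· != 0)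
    · simp only [hgd, if_pos hd]
      rw [IH (pairDiffs diffs).length hlt (pairDiffs diffs) _ rfl]
      conv_rhs => rw [calc_diff_list_alt]
      simp only [dif_pos hd, List.drop_succ_cons, List.drop_zero]
      rw [alt_cons (pairDiffs diffs)]
      simp
    · simp only [hgd, if_neg hd]
      rw [IH (pairDiffs diffs).length hlt (pairDiffs diffs) _ rfl]
      conv_rhs => rw [calc_diff_list_alt]
      simp only [dif_neg hd]
      rw [alt_zero (pairDiffs diffs) (by simpa using hd)]
      simp
  · rw [dif_neg h, alt_zero diffs (by simpa using h)]
    simp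

-- ===== VERDICT (by name: the statement is the Claim_ definition above) =====
theorem calc_diff_list_spec : Claim_equal_calc_diff_list := by
  intro seq _
  unfold Spec_calc_diff_list calc_diff_list
  rw [loop_eq_alt_drop]
  conv_rhs => rw [alt_cons seq]
  simp
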